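-- pv_equiv track=rewrite | github.com/BigAddict/WozapAuto | core/utils.py | sanitize_business_name_to_username
-- ===== SOURCE A (Python) =====
-- def sanitize_business_name_to_username(business_name: str) -> str:
--     """
--     Sanitize business name to a valid username format.
--     Converts "Binary Craft Technologies" to "binary-craft-technologies"
--
--     Args:
--         business_name: Business name string
--
--     Returns:
--         Sanitized username string
--     """
--     if not business_name:
--         return ""
--
--     # Convert to lowercase, replace spaces and special chars with hyphens
--     username = business_name.lower().strip()
--     # Remove special characters except spaces and hyphens
--     username = ''.join(c if c.isalnum() or c in [' ', '-'] else '' for c in username)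
--     # Replace spaces with hyphens
--     username = username.replace(' ', '-')
--     # Replace multiple hyphens with single hyphen
--     while '--' in username:
--         username = username.replace('--', '-')
--     # Remove leading/trailing hyphens
--     username = username.strip('-')
--
--     return username
-- ===== SOURCE B (Python) =====
-- def sanitize_business_name_to_username(business_name: str) -> str:
--     # Single pass: accumulate alphanumeric runs as tokens; space/hyphen flush the
--     # current token; every other character is dropped (gluing its neighbours).
--     tokens = []
--     cur = ''
--     for c in business_name.lower():
--         if c.isalnum():
--             cur += c
--         elif c == ' ' or c == '-':
--             if cur:
--                 tokens.append(cur)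
--                 cur = ''
--     if cur:
--         tokens.append(cur)
--     return '-'.join(tokens)
-- ===== Notes on version B (the rewrite author's own statement) =====
-- stated objective: alternative
-- what changed: Replaces A's multi-pass pipeline (strip, filter-join, space-to-hyphen replace, a while loop collapsing repeated hyphens, then stripping outer hyphens) with a single left-to-right tokenizer that accumulates alphanumeric runs and joins the collected tokens with hyphens.
import Mathlib
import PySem

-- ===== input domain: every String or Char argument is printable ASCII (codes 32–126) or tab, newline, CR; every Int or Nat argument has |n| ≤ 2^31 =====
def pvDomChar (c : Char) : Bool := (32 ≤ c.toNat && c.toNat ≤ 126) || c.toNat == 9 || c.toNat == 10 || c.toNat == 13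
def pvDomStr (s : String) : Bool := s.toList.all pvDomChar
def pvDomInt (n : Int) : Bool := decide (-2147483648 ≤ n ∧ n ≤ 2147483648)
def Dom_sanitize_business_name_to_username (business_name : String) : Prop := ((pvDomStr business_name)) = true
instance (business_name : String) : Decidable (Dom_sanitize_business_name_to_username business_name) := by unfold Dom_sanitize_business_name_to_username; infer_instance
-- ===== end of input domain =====

-- B replaces A's multi-pass pipeline (strip, filter, replace, hyphen-collapse loop, outer strip)
-- with a single-pass tokenizer; the return values are proved identical (objective: alternative).

-- ===== PORT A =====
-- `c.isalnum() or c in [' ', '-']`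
def pvKeepA (c : Char) : Bool := PySem.Chars.isalnum c || [' ', '-'].contains c

-- `while '--' in username: username = username.replace('--', '-')`; the fuel only
-- makes the loop total (each round shortens the string, so `u.length` fuel suffices).
def pvWhileCollapse : Nat → List Char → List Char
  | 0, u => u
  | fuel+1, u =>
    if PySem.Chars.isIn ['-', '-'] u then
      pvWhileCollapse fuel (PySem.Chars.replace u ['-', '-'] ['-'])
    else u

def sanitize_business_name_to_username (business_name : String) : String :=
  if business_name.toList = [] then "" else
    let u0 : List Char := PySem.Chars.strip (PySem.Chars.lower business_name.toList)
    let u1 : List Char := u0.filter pvKeepA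
    let u2 : List Char := PySem.Chars.replace u1 [' '] ['-']
    let u3 : List Char := pvWhileCollapse u2.length u2
    String.ofList (PySem.Chars.stripChars u3 ['-'])

-- ===== PORT B =====
-- the `for c in business_name.lower()` loop of Source B: state = (tokens, cur)
def pvAltGo : List Char → List (List Char) → List Char → List (List Char) × List Char
  | [], toks, cur => (toks, cur)
  | c :: rest, toks, cur =>
    if PySem.Chars.isalnum c then pvAltGo rest toks (cur ++ [c])
    else if c = ' ' || c = '-' then
      (if cur = [] then pvAltGo rest toks [] else pvAltGo rest (toks ++ [cur]) [])
    else pvAltGo rest toks cur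

-- the final `if cur: tokens.append(cur)` of Source B
def pvAltFinish (r : List (List Char) × List Char) : List (List Char) :=
  if r.2 = [] then r.1 else r.1 ++ [r.2]

def sanitize_business_name_to_username_alt (business_name : String) : String :=
  String.ofList (PySem.Chars.join ['-']
    (pvAltFinish (pvAltGo (PySem.Chars.lower business_name.toList) [] [])))

-- ===== PRECONDITION & SPEC =====
def Spec_sanitize_business_name_to_username (business_name : String) (out : String) : Prop := out = sanitize_business_name_to_username_alt business_name
instance (business_name : String) (out : String) : Decidable (Spec_sanitize_business_name_to_username business_name out) := by unfold Spec_sanitize_business_name_to_username; infer_instance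

-- ===== CLAIM (what is proved, stated in full; the proofs are below) =====
def Claim_equal_sanitize_business_name_to_username : Prop := ∀ (business_name : String), Dom_sanitize_business_name_to_username business_name → Spec_sanitize_business_name_to_username business_name (sanitize_business_name_to_username business_name)

-- ===== LEMMAS AND PROOFS =====

-- proof-only helpers: the canonical middle form both ports are reduced to is
-- `pvJoin (pvTok m)` for m = map pvH (filter pvKeepA (lower s))
def pvH (c : Char) : Char := if c = ' ' then '-' else c

-- one non-overlapping replace pass, result of `username.replace('--', '-')`
def pvR : List Char → List Char
  | [] => []
  | c :: t => if ['-', '-'].isPrefixOf (c :: t) then '-' :: pvR (t.drop 1) else c :: pvR t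
  termination_by l => l.length
  decreasing_by
    · simpa using Nat.lt_succ_of_le (Nat.le_trans (List.length_drop_le 1 t) (Nat.le_refl _))
    · simp

def pvTok : List Char → List (List Char)
  | [] => []
  | c :: t =>
    if c = '-' then pvTok t
    else (c :: t.takeWhile (· != '-')) :: pvTok (t.dropWhile (· != '-'))
  termination_by l => l.length
  decreasing_by
    · simp
    · simpa using Nat.lt_succ_of_le (List.length_dropWhile_le _ _)

def pvJoin : List (List Char) → List Char
  | [] => []
  | [x] => x
  | x :: y :: r => x ++ '-' :: pvJoin (y :: r)

def pvP (c : Char) : Bool := ['-'].contains c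

def pvRstripH (l : List Char) : List Char := (l.reverse.dropWhile pvP).reverse

theorem pvTok_nil : pvTok [] = [] := by rw [pvTok]

-- char facts
theorem pvAlnum_ne_space {c : Char} (h : PySem.Chars.isalnum c = true) : c ≠ ' ' := by
  rintro rfl; exact absurd h (by decide)

theorem pvAlnum_ne_hyph {c : Char} (h : PySem.Chars.isalnum c = true) : c ≠ '-' := by
  rintro rfl; exact absurd h (by decide)

theorem pvCharLt (c d : Char) : (c < d) ↔ c.toNat < d.toNat := Iff.rfl

theorem pvSpace_not_alnum {c : Char} (h : PySem.Chars.isspace c = true) :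
    PySem.Chars.isalnum c = false := by
  unfold PySem.Chars.isspace at h
  unfold PySem.Chars.isalnum PySem.Chars.isalpha PySem.Chars.isdigit PySem.Chars.isupper PySem.Chars.islower
  simp only [Bool.or_eq_true, Bool.and_eq_true, decide_eq_true_eq] at h
  simp only [Bool.or_eq_false_iff, Bool.and_eq_false_iff, decide_eq_false_iff_not, not_le, pvCharLt,
    show 'A'.toNat = 65 from rfl, show 'Z'.toNat = 90 from rfl, show 'a'.toNat = 97 from rfl,
    show 'z'.toNat = 122 from rfl, show '0'.toNat = 48 from rfl, show '9'.toNat = 57 from rfl]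
  omega

theorem pvSpace_ne_hyph {c : Char} (h : PySem.Chars.isspace c = true) : c ≠ '-' := by
  rintro rfl; exact absurd h (by decide)

-- replace('--','-') is pvR
theorem pv_goDD (fuel : Nat) : ∀ (l acc : List Char), l.length ≤ fuel →
    PySem.Chars.replace.go ['-', '-'] ['-'] fuel l acc = acc.reverse ++ pvR l := by
  induction fuel with
  | zero =>
    intro l acc h
    have hl : l = [] := List.eq_nil_of_length_eq_zero (Nat.le_zero.mp h)
    subst hl
    rw [PySem.Chars.replace.go.eq_def]
    simp [pvR]
  | succ fuel ih =>
    intro l acc h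
    match l with
    | [] => rw [PySem.Chars.replace.go.eq_def]; simp [pvR]
    | c :: t =>
      rw [PySem.Chars.replace.go.eq_def]
      simp only []
      by_cases hp : ['-', '-'].isPrefixOf (c :: t) = true
      · rw [if_pos hp]
        obtain ⟨hc, ht⟩ : '-' = c ∧ ['-'] <+: t := by
          simpa [List.isPrefixOf] using hp
        obtain ⟨t2, rfl⟩ := ht
        subst hc
        simp only [List.cons_append, List.nil_append, List.length_cons, List.drop_succ_cons,
          List.length_nil, List.drop_zero] at h ⊢
        rw [ih t2 _ (by omega)]
        rw [pvR]
        simp [List.isPrefixOf]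
      · rw [if_neg hp]
        rw [ih t (c :: acc) (by simpa using Nat.le_of_succ_le_succ h)]
        rw [pvR, if_neg hp]
        simp

theorem pv_replace_dd (u : List Char) :
    PySem.Chars.replace u ['-', '-'] ['-'] = pvR u := by
  unfold PySem.Chars.replace
  rw [if_neg (by simp)]
  rw [pv_goDD u.length u [] (Nat.le_refl _)]
  simp

-- replace(' ','-') is map pvH
theorem pv_goSp (fuel : Nat) : ∀ (l acc : List Char), l.length ≤ fuel →
    PySem.Chars.replace.go [' '] ['-'] fuel l acc = acc.reverse ++ l.map pvH := by
  induction fuel with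
  | zero =>
    intro l acc h
    have hl : l = [] := List.eq_nil_of_length_eq_zero (Nat.le_zero.mp h)
    subst hl
    rw [PySem.Chars.replace.go.eq_def]
    simp
  | succ fuel ih =>
    intro l acc h
    match l with
    | [] => rw [PySem.Chars.replace.go.eq_def]; simp
    | c :: t =>
      rw [PySem.Chars.replace.go.eq_def]
      simp only []
      by_cases hp : [' '].isPrefixOf (c :: t) = true
      · rw [if_pos hp]
        have hc : c = ' ' := by
          have h2 : ' ' = c ∧ [] <+: t := by simpa [List.isPrefixOf] using hp
          exact h2.1.symm
        simp only [List.length_cons] at h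
        simp only [List.length_singleton, List.drop_succ_cons, List.drop_zero]
        rw [ih t _ (by omega)]
        subst hc
        simp [pvH]
      · rw [if_neg hp]
        have hc : c ≠ ' ' := by
          intro hc; exact hp (by subst hc; simp [List.isPrefixOf])
        simp only [List.length_cons] at h
        rw [ih t _ (by omega)]
        simp [pvH, hc]

theorem pv_replace_sp (u : List Char) :
    PySem.Chars.replace u [' '] ['-'] = u.map pvH := by
  unfold PySem.Chars.replace
  rw [if_neg (by simp)]
  rw [pv_goSp u.length u [] (Nat.le_refl _)]
  simp

theorem pvR_len_le (l : List Char) : (pvR l).length ≤ l.length := by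
  fun_induction pvR l with
  | case1 => simp
  | case2 c t hp ih =>
    have := List.length_drop (l := t) (i := 1)
    simp at ih ⊢
    omega
  | case3 c t hp ih => simp; omega

theorem pvR_len_lt (l : List Char) (h : ['-', '-'] <:+: l) : (pvR l).length < l.length := by
  induction l with
  | nil => simp at h
  | cons c t ih =>
    rw [pvR]
    by_cases hp : ['-', '-'].isPrefixOf (c :: t) = true
    · rw [if_pos hp]
      obtain ⟨hc, ht⟩ : '-' = c ∧ ['-'] <+: t := by simpa [List.isPrefixOf] using hp
      obtain ⟨t2, rfl⟩ := ht
      have := pvR_len_le (List.drop 1 (['-'] ++ t2))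
      simp at this ⊢
      omega
    · rw [if_neg hp]
      obtain ⟨s, e, hse⟩ := h
      match s, hse with
      | [], hse =>
        exfalso
        apply hp
        simp at hse
        obtain ⟨rfl, ht⟩ := hse
        rw [← ht]
        simp [List.isPrefixOf]
      | x :: s', hse =>
        have ht : ['-', '-'] <:+: t := by
          refine ⟨s', e, ?_⟩
          have h2 : x :: (s' ++ ['-', '-'] ++ e) = c :: t := by simpa using hse
          injection h2 with _ h3
        have := ih ht
        simp
        omega

theorem pvR_takeWhile (t : List Char) :
    (pvR t).takeWhile (· != '-') = t.takeWhile (· != '-') := by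
  fun_induction pvR t with
  | case1 => simp
  | case2 c t hp ih =>
    obtain ⟨hc, ht⟩ : '-' = c ∧ ['-'] <+: t := by simpa [List.isPrefixOf] using hp
    subst hc
    obtain ⟨t2, rfl⟩ := ht
    simp [List.takeWhile]
  | case3 c t hp ih =>
    by_cases hc : c = '-'
    · subst hc; simp [List.takeWhile]
    · simp [List.takeWhile, hc, ih]

theorem pvR_dropWhile (t : List Char) :
    (pvR t).dropWhile (· != '-') = pvR (t.dropWhile (· != '-')) := by
  fun_induction pvR t with
  | case1 => simp [pvR]
  | case2 c t hp ih =>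
    obtain ⟨hc, ht⟩ : '-' = c ∧ ['-'] <+: t := by simpa [List.isPrefixOf] using hp
    subst hc
    obtain ⟨t2, rfl⟩ := ht
    simp only [List.cons_append, List.nil_append, List.drop_succ_cons, List.drop_zero] at ih ⊢
    conv_rhs => rw [pvR.eq_def]
    simp [List.dropWhile, List.isPrefixOf]
  | case3 c t hp ih =>
    by_cases hc : c = '-'
    · subst hc
      conv_rhs => rw [pvR.eq_def]
      simp [List.dropWhile, hp]
    · have hb : (c != '-') = true := by simpa using hc
      simp [List.dropWhile, hb, ih]

theorem pvTok_pvR (u : List Char) : pvTok (pvR u) = pvTok u := by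
  induction hn : u.length using Nat.strong_induction_on generalizing u with
  | _ n IH =>
  match u with
  | [] => simp [pvR]
  | c :: t =>
    rw [pvR]
    by_cases hp : ['-', '-'].isPrefixOf (c :: t) = true
    · rw [if_pos hp]
      obtain ⟨hc, ht⟩ : '-' = c ∧ ['-'] <+: t := by simpa [List.isPrefixOf] using hp
      subst hc
      obtain ⟨t2, rfl⟩ := ht
      simp only [List.cons_append, List.nil_append, List.drop_succ_cons, List.drop_zero]
      rw [pvTok]; rw [if_pos rfl]
      rw [pvTok]; rw [if_pos rfl]
      rw [pvTok]; rw [if_pos rfl]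
      subst hn
      exact IH t2.length (by simp) t2 rfl
    · rw [if_neg hp]
      by_cases hc : c = '-'
      · subst hc
        rw [pvTok]; rw [if_pos rfl]
        rw [pvTok]; rw [if_pos rfl]
        subst hn
        exact IH t.length (by simp) t rfl
      · rw [pvTok]; rw [if_neg hc]
        rw [pvTok]; rw [if_neg hc]
        rw [pvR_takeWhile, pvR_dropWhile]
        subst hn
        rw [IH (t.dropWhile (· != '-')).length
          (by simpa using Nat.lt_succ_of_le (List.length_dropWhile_le _ _))
          _ rfl]

-- pvRstripH structure
theorem pvRstripH_cons {c : Char} (x : List Char) (hc : c ≠ '-') :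
    pvRstripH (c :: x) = c :: pvRstripH x := by
  unfold pvRstripH
  simp only [List.reverse_cons, List.dropWhile_append]
  have hpc : pvP c = false := by simp [pvP, hc]
  split
  · rename_i hemp
    simp only [List.isEmpty_iff] at hemp
    simp [List.dropWhile, hpc, hemp]
  · simp [List.dropWhile, hpc]

theorem pvRstripH_hyph {x : List Char} (hx : pvRstripH x ≠ []) :
    pvRstripH ('-' :: x) = '-' :: pvRstripH x := by
  unfold pvRstripH at hx ⊢
  simp only [List.reverse_cons, List.dropWhile_append]
  have hemp : (x.reverse.dropWhile pvP).isEmpty = false := by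
    simp only [List.isEmpty_eq_false_iff]
    intro h0
    exact hx (by simp [h0])
  rw [if_neg (by simp [hemp])]
  simp

theorem pvJoin_cons (x : List Char) (r : List (List Char)) :
    pvJoin (x :: r) = x ++ (if r = [] then [] else '-' :: pvJoin r) := by
  match r with
  | [] => simp [pvJoin]
  | y :: r' => simp [pvJoin]

-- the '--'-free case: stripping outer hyphens = join of tokens
theorem pvNoDD_tail {c : Char} {t : List Char} (h : ¬ ['-', '-'] <:+: (c :: t)) :
    ¬ ['-', '-'] <:+: t := fun hi => h (List.infix_cons hi)

theorem pvRstripH_tok (t : List Char) (h : ¬ ['-', '-'] <:+: t) :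
    pvRstripH t =
      t.takeWhile (· != '-') ++
        (if pvTok (t.dropWhile (· != '-')) = [] then []
         else '-' :: pvJoin (pvTok (t.dropWhile (· != '-')))) := by
  induction hn : t.length using Nat.strong_induction_on generalizing t with
  | _ n IH =>
  match t with
  | [] => simp [pvRstripH, pvTok_nil]
  | c :: t' =>
    by_cases hc : c = '-'
    · subst hc
      have htw : (('-' :: t').takeWhile (· != '-')) = [] := by simp [List.takeWhile]
      have hdw : (('-' :: t').dropWhile (· != '-')) = '-' :: t' := by simp [List.dropWhile]
      rw [htw, hdw, pvTok, if_pos rfl]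
      simp only [List.nil_append]
      match t' with
      | [] =>
        rw [pvTok_nil, if_pos rfl]
        simp [pvRstripH, pvP, List.dropWhile]
      | c2 :: t'' =>
        have hc2 : c2 ≠ '-' := by
          rintro rfl
          exact h ⟨[], t'', rfl⟩
        have hne : pvTok (c2 :: t'') ≠ [] := by rw [pvTok, if_neg hc2]; simp
        rw [if_neg hne]
        have hx : pvRstripH (c2 :: t'') ≠ [] := by rw [pvRstripH_cons _ hc2]; simp
        rw [pvRstripH_hyph hx, pvRstripH_cons _ hc2]
        have IHt := IH t''.length (by subst hn; simp) t''
          (pvNoDD_tail (pvNoDD_tail h)) rfl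
        rw [IHt, pvTok, if_neg hc2, pvJoin_cons]
        simp
    · have hbc : (c != '-') = true := by simpa using hc
      rw [pvRstripH_cons _ hc]
      simp only [List.takeWhile_cons, List.dropWhile_cons, hbc]
      rw [IH t'.length (by subst hn; simp) t' (pvNoDD_tail h) rfl]
      simp

theorem pv_noDD (u : List Char) (h : ¬ ['-', '-'] <:+: u) :
    pvRstripH (u.dropWhile pvP) = pvJoin (pvTok u) := by
  induction hn : u.length using Nat.strong_induction_on generalizing u with
  | _ n IH =>
  match u with
  | [] => simp [pvRstripH, pvTok_nil, pvJoin]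
  | c :: t =>
    by_cases hc : c = '-'
    · subst hc
      have hdp : pvP '-' = true := by simp [pvP]
      simp only [List.dropWhile_cons, hdp, if_true]
      rw [pvTok, if_pos rfl]
      exact IH t.length (by subst hn; simp) t (pvNoDD_tail h) rfl
    · have hdp : pvP c = false := by simp [pvP, hc]
      simp only [List.dropWhile_cons, hdp]
      rw [show (if (false = true) then List.dropWhile pvP t else c :: t) = c :: t from if_neg (by simp)]
      rw [pvTok, if_neg hc, pvJoin_cons, pvRstripH_cons _ hc, pvRstripH_tok t (pvNoDD_tail h)]
      simp

theorem pvWhile_spec (fuel : Nat) : ∀ (u : List Char), u.length ≤ fuel →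
    pvRstripH ((pvWhileCollapse fuel u).dropWhile pvP) = pvJoin (pvTok u) := by
  induction fuel with
  | zero =>
    intro u h
    have hu : u = [] := List.eq_nil_of_length_eq_zero (Nat.le_zero.mp h)
    subst hu
    simp [pvWhileCollapse, pvRstripH, pvTok_nil, pvJoin]
  | succ fuel ih =>
    intro u h
    rw [pvWhileCollapse]
    by_cases hin : PySem.Chars.isIn ['-', '-'] u = true
    · rw [if_pos hin, pv_replace_dd]
      have hinf : ['-', '-'] <:+: u := (PySem.Chars.isIn_iff_infix _ _).mp hin
      have hlt := pvR_len_lt u hinf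
      rw [ih (pvR u) (by omega)]
      rw [pvTok_pvR]
    · rw [if_neg hin]
      exact pv_noDD u ((PySem.Chars.isIn_eq_false_iff _ _).mp (by simpa using hin))

-- tokens ignore surrounding hyphens
theorem pvTok_prepend_hyph (a x : List Char) (ha : ∀ c ∈ a, c = '-') :
    pvTok (a ++ x) = pvTok x := by
  induction a with
  | nil => simp
  | cons c a' ih =>
    have hc : c = '-' := ha c (by simp)
    subst hc
    rw [List.cons_append, pvTok, if_pos rfl]
    exact ih (fun c hc => ha c (by simp [hc]))

theorem pvTok_append_hyph (x b : List Char) (hb : ∀ c ∈ b, c = '-') :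
    pvTok (x ++ b) = pvTok x := by
  match b, hb with
  | [], _ => simp
  | c2 :: b', hb =>
    have hc2 : c2 = '-' := hb c2 (by simp)
    subst hc2
    induction hn : x.length using Nat.strong_induction_on generalizing x with
    | _ n IH =>
    match x with
    | [] =>
      have := pvTok_prepend_hyph ('-' :: b') [] hb
      simpa [pvTok_nil] using this
    | '-' :: x' =>
      rw [List.cons_append, pvTok, if_pos rfl, pvTok, if_pos rfl]
      subst hn
      exact IH x'.length (by simp) x' rfl
    | c :: x' =>
      by_cases hc : c = '-'
      · subst hc
        rw [List.cons_append, pvTok, if_pos rfl, pvTok, if_pos rfl]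
        subst hn
        exact IH x'.length (by simp) x' rfl
      · rw [List.cons_append, pvTok, if_neg hc, pvTok, if_neg hc]
        by_cases hemp : (x'.dropWhile (· != '-')).isEmpty = true
        · have hdw : x'.dropWhile (· != '-') = [] := by simpa using hemp
          have htw : x'.takeWhile (· != '-') = x' := by
            have h0 := List.takeWhile_append_dropWhile (p := (· != '-')) (l := x')
            rw [hdw] at h0
            simpa using h0
          rw [List.takeWhile_append, if_pos (by rw [htw]), List.dropWhile_append, if_pos hemp]
          rw [htw, hdw]
          have htb : (('-' :: b').takeWhile (· != '-')) = [] := by simp [List.takeWhile]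
          have hdb : (('-' :: b').dropWhile (· != '-')) = '-' :: b' := by simp [List.dropWhile]
          rw [htb, hdb]
          have hpb : pvTok ('-' :: b') = [] := by
            have := pvTok_prepend_hyph ('-' :: b') [] hb
            simpa [pvTok_nil] using this
          rw [hpb]
          simp [pvTok_nil]
        · have hlen : (x'.takeWhile (· != '-')).length ≠ x'.length := by
            have h0 := congrArg List.length (List.takeWhile_append_dropWhile (p := (· != '-')) (l := x'))
            simp only [List.length_append] at h0
            have h1 : (x'.dropWhile (· != '-')).length ≠ 0 := by
              simpa [List.isEmpty_iff, List.length_eq_zero_iff] using hemp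
            omega
          rw [List.takeWhile_append, if_neg hlen, List.dropWhile_append, if_neg hemp]
          subst hn
          rw [IH (x'.dropWhile (· != '-')).length
            (by simpa using Nat.lt_succ_of_le (List.length_dropWhile_le _ _)) _ rfl]

theorem pvTok_nohyph (l : List Char) (hl : ∀ c ∈ l, c ≠ '-') (hne : l ≠ []) :
    pvTok l = [l] := by
  match l with
  | [] => exact absurd rfl hne
  | c :: t =>
    have hc : c ≠ '-' := hl c (by simp)
    rw [pvTok, if_neg hc]
    have hdw : t.dropWhile (· != '-') = [] := by
      rw [List.dropWhile_eq_nil_iff]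
      intro y hy
      simpa using hl y (by simp [hy])
    have htw : t.takeWhile (· != '-') = t := by
      have h0 := List.takeWhile_append_dropWhile (p := (· != '-')) (l := t)
      rw [hdw] at h0
      simpa using h0
    rw [hdw, htw]
    simp [pvTok_nil]

theorem pvTok_append_sep (cur m : List Char) (h : ∀ c ∈ cur, c ≠ '-') (hne : cur ≠ []) :
    pvTok (cur ++ '-' :: m) = cur :: pvTok m := by
  match cur with
  | [] => exact absurd rfl hne
  | c :: cur' =>
    have hc : c ≠ '-' := h c (by simp)
    rw [List.cons_append, pvTok, if_neg hc]
    have hdw : cur'.dropWhile (· != '-') = [] := by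
      rw [List.dropWhile_eq_nil_iff]
      intro y hy
      simpa using h y (by simp [hy])
    have htw : cur'.takeWhile (· != '-') = cur' := by
      have h0 := List.takeWhile_append_dropWhile (p := (· != '-')) (l := cur')
      rw [hdw] at h0
      simpa using h0
    rw [List.takeWhile_append, if_pos (by rw [htw]), List.dropWhile_append, if_pos (by simp [hdw])]
    have htb : (('-' :: m).takeWhile (· != '-')) = [] := by simp [List.takeWhile]
    have hdb : (('-' :: m).dropWhile (· != '-')) = '-' :: m := by simp [List.dropWhile]
    rw [htb, hdb, pvTok, if_pos rfl]
    simp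

-- B's loop computes the tokens of the filtered/mapped list
theorem pvAltGo_spec (ls : List Char) : ∀ (toks : List (List Char)) (cur : List Char),
    (∀ c ∈ cur, c ≠ '-') →
    pvAltFinish (pvAltGo ls toks cur) = toks ++ pvTok (cur ++ (ls.filter pvKeepA).map pvH) := by
  induction ls with
  | nil =>
    intro toks cur h
    by_cases hcur : cur = []
    · simp [pvAltGo, pvAltFinish, hcur, pvTok_nil]
    · simp [pvAltGo, pvAltFinish, hcur, pvTok_nohyph cur h hcur]
  | cons c rest ih =>
    intro toks cur h
    rw [pvAltGo]
    by_cases ha : PySem.Chars.isalnum c = true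
    · rw [if_pos ha]
      have hk : pvKeepA c = true := by simp [pvKeepA, ha]
      have hH : pvH c = c := by simp [pvH, pvAlnum_ne_space ha]
      have h' : ∀ c' ∈ cur ++ [c], c' ≠ '-' := by
        intro c' hc'
        rcases List.mem_append.mp hc' with h1 | h1
        · exact h c' h1
        · simp at h1; subst h1; exact pvAlnum_ne_hyph ha
      rw [ih toks (cur ++ [c]) h']
      simp [List.filter_cons, hk, hH]
    · rw [if_neg ha]
      by_cases hs : c = ' ' ∨ c = '-'
      · have hsb : (decide (c = ' ') || decide (c = '-')) = true := by
          rcases hs with rfl | rfl <;> simp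
        rw [if_pos hsb]
        have hk : pvKeepA c = true := by
          rcases hs with rfl | rfl <;> simp [pvKeepA]
        have hH : pvH c = '-' := by
          rcases hs with rfl | rfl <;> simp [pvH]
        by_cases hcur : cur = []
        · rw [if_pos hcur]
          subst hcur
          rw [ih toks [] (by simp)]
          simp only [List.nil_append, List.filter_cons, hk, if_true, List.map_cons, hH]
          rw [pvTok, if_pos rfl]
        · rw [if_neg hcur]
          rw [ih (toks ++ [cur]) [] (by simp)]
          simp only [List.nil_append, List.filter_cons, hk, if_true, List.map_cons, hH]
          rw [pvTok_append_sep cur _ h hcur]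
          simp
      · have hsb : (decide (c = ' ') || decide (c = '-')) = false := by
          push_neg at hs
          simp [hs.1, hs.2]
        rw [if_neg (by simp [hsb])]
        have hk : pvKeepA c = false := by
          push_neg at hs
          simp [pvKeepA, ha, hs.1, hs.2]
        rw [ih toks cur h]
        simp [List.filter_cons, hk]

theorem pvJoin_eq_join (ts : List (List Char)) : PySem.Chars.join ['-'] ts = pvJoin ts := by
  unfold PySem.Chars.join
  induction ts with
  | nil => simp [List.intercalate, pvJoin]
  | cons x r ih =>
    match r with
    | [] => simp [List.intercalate, pvJoin]
    | y :: r' =>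
      rw [pvJoin, ← ih]
      simp [List.intercalate]

-- A's strip() only sheds whitespace that becomes outer hyphens
theorem pvTok_strip (ls : List Char) :
    pvTok (((PySem.Chars.strip ls).filter pvKeepA).map pvH) =
      pvTok ((ls.filter pvKeepA).map pvH) := by
  unfold PySem.Chars.strip PySem.Chars.lstrip PySem.Chars.rstrip
  have hsp : ∀ (w : List Char), (∀ c ∈ w, PySem.Chars.isspace c = true) →
      ∀ c' ∈ (w.filter pvKeepA).map pvH, c' = '-' := by
    intro w hw c' hc'
    obtain ⟨c, hcmem, rfl⟩ := List.mem_map.mp hc'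
    obtain ⟨hcw, hk⟩ := List.mem_filter.mp hcmem
    have hcs := hw c hcw
    have h1 : PySem.Chars.isalnum c = false := pvSpace_not_alnum hcs
    have h2 : c ≠ '-' := pvSpace_ne_hyph hcs
    have h3 : c = ' ' := by
      simp [pvKeepA, h1, h2] at hk
      exact hk
    subst h3
    simp [pvH]
  set y := ls.dropWhile PySem.Chars.isspace with hy
  -- trailing side of y
  have hyd : y = (y.reverse.dropWhile PySem.Chars.isspace).reverse ++
      (y.reverse.takeWhile PySem.Chars.isspace).reverse := by
    have h0 := List.takeWhile_append_dropWhile (p := PySem.Chars.isspace) (l := y.reverse)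
    have h1 := congrArg List.reverse h0
    rw [List.reverse_append, List.reverse_reverse] at h1
    exact h1.symm
  -- leading side of ls
  have hls : ls = ls.takeWhile PySem.Chars.isspace ++ y :=
    (List.takeWhile_append_dropWhile (p := PySem.Chars.isspace) (l := ls)).symm
  conv_rhs => rw [hls]
  rw [List.filter_append, List.map_append]
  rw [pvTok_prepend_hyph _ _ (hsp _ (fun c hc => List.mem_takeWhile_imp hc))]
  conv_rhs => rw [hyd]
  rw [List.filter_append, List.map_append]
  rw [pvTok_append_hyph _ _ (hsp _ (fun c hc => List.mem_takeWhile_imp (List.mem_reverse.mp hc)))]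

theorem pv_alt_eval (s : String) :
    sanitize_business_name_to_username_alt s =
      String.ofList (pvJoin (pvTok (((PySem.Chars.lower s.toList).filter pvKeepA).map pvH))) := by
  unfold sanitize_business_name_to_username_alt
  have h0 := pvAltGo_spec (PySem.Chars.lower s.toList) [] [] (by simp)
  simp only [List.nil_append] at h0
  rw [pvJoin_eq_join, h0]

theorem pv_a_eval (s : String) (hs : s.toList ≠ []) :
    sanitize_business_name_to_username s =
      String.ofList (pvJoin (pvTok (((PySem.Chars.lower s.toList).filter pvKeepA).map pvH))) := by
  unfold sanitize_business_name_to_username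
  rw [if_neg hs]
  simp only [pv_replace_sp]
  rw [show ∀ (X : List Char), PySem.Chars.stripChars X ['-'] = pvRstripH (X.dropWhile pvP) from
    fun X => rfl]
  rw [pvWhile_spec _ _ (Nat.le_refl _)]
  rw [pvTok_strip]

-- ===== VERDICT (by name: the statement is the Claim_ definition above) =====
theorem sanitize_business_name_to_username_spec : Claim_equal_sanitize_business_name_to_username := by
  intro s _
  unfold Spec_sanitize_business_name_to_username
  by_cases hs : s.toList = []
  · unfold sanitize_business_name_to_username sanitize_business_name_to_username_alt
    rw [if_pos hs, hs]
    simp [PySem.Chars.lower, pvAltGo, pvAltFinish, PySem.Chars.join, List.intercalate]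
  · rw [pv_a_eval s hs, pv_alt_eval s]
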